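-- pv_equiv track=rewrite | github.com/msaadshaikh2002/ledger | parser.py | extract_person
-- ===== SOURCE A (Python) =====
-- def normalize_name(name):
--     return name.strip().title()
--
-- def extract_person(text):
--     words = text.split()
--
--     for i, word in enumerate(words):
--         if word.lower() in ["ko", "ne", "se"]:
--             if i > 0:
--                 return normalize_name(words[i - 1])
--
--     # fallback: first capitalized word
--     for word in words:
--         if word[0].isupper() and not word.isdigit():
--             return normalize_name(word)
--
--     return "Unknown"
-- ===== SOURCE B (Python) =====
-- def normalize_name(name):
--     return name.strip().title()
--
-- def extract_person(text):
--     fallback = None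
--     prev = None
--     for word in text.split():
--         if prev is not None and word.lower() in ("ko", "ne", "se"):
--             return normalize_name(prev)
--         if fallback is None and word[0].isupper() and not word.isdigit():
--             fallback = normalize_name(word)
--         prev = word
--     return fallback if fallback is not None else "Unknown"
-- ===== Notes on version B (the rewrite author's own statement) =====
-- stated objective: alternative
-- what changed: B fuses A's two sequential scans (marker search, then fallback scan for the first capitalized word) into a single pass that carries the previous word and a once-set fallback variable, returning early on the first marker with a predecessor.
import Mathlib
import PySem

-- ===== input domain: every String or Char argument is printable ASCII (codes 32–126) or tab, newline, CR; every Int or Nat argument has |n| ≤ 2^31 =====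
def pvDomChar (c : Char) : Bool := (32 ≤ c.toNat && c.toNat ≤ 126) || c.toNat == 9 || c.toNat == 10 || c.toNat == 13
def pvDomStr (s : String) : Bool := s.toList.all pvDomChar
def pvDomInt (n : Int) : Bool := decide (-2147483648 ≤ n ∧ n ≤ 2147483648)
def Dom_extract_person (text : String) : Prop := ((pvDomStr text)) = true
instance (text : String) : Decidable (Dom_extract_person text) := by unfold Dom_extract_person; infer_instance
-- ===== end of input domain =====

-- B fuses A's two sequential scans (marker search, then first-capitalized fallback) into one
-- pass carrying the previous word and a once-set fallback; same values everywhere (alternative).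

-- ===== PORT A =====
-- str.title(), ported by hand (exact on ASCII): a letter is uppercased after a non-letter,
-- lowercased after a letter; non-letters are kept.
def pvTitleChars : List Char → Bool → List Char
  | [], _ => []
  | c :: rest, prevAlpha =>
    (if prevAlpha then PySem.Chars.lowerChar c else PySem.Chars.upperChar c)
      :: pvTitleChars rest (PySem.Chars.isalpha c)

def normalize_name (name : String) : String :=
  String.ofList (pvTitleChars (PySem.Str.strip name).toList false)

-- first loop: for i, word in enumerate(words): …
def pvLoopA (words : List String) : List (Int × String) → Option String
  | [] => none
  | (i, w) :: rest =>
    if (["ko", "ne", "se"] : List String).contains (PySem.Str.lower w) then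
      if i > 0 then (PySem.List.pyGet? words (i - 1)).map normalize_name
      else pvLoopA words rest
    else pvLoopA words rest

-- fallback loop: word[0] via pyGet? (split() never yields "", so the none branch is unreachable)
def pvLoopA2 : List String → Option String
  | [] => none
  | w :: rest =>
    match PySem.List.pyGet? w.toList 0 with
    | none => pvLoopA2 rest
    | some c =>
      if PySem.Chars.isupper c && !PySem.Str.strIsdigit w then some (normalize_name w)
      else pvLoopA2 rest

def extract_person (text : String) : String :=
  let words := PySem.Str.split₀ text
  match pvLoopA words (PySem.List.enumerate words 0) with
  | some r => r
  | none =>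
    match pvLoopA2 words with
    | some r => r
    | none => "Unknown"

-- ===== PORT B =====
-- 'if fallback is None and word[0].isupper() and not word.isdigit(): fallback = …'
def pvUpd (fallback : Option String) (w : String) : Option String :=
  match fallback with
  | some _ => fallback
  | none =>
    match PySem.List.pyGet? w.toList 0 with
    | none => fallback
    | some c =>
      if PySem.Chars.isupper c && !PySem.Str.strIsdigit w then some (normalize_name w)
      else fallback

def pvLoopB : List String → Option String → Option String → String
  | [], _, fallback => fallback.getD "Unknown"
  | w :: rest, prev, fallback =>
    match prev with
    | some p =>
      if (["ko", "ne", "se"] : List String).contains (PySem.Str.lower w) then normalize_name p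
      else pvLoopB rest (some w) (pvUpd fallback w)
    | none => pvLoopB rest (some w) (pvUpd fallback w)

def extract_person_alt (text : String) : String :=
  pvLoopB (PySem.Str.split₀ text) none none

-- ===== PRECONDITION & SPEC =====
def Spec_extract_person (text : String) (out : String) : Prop := out = extract_person_alt text
instance (text : String) (out : String) : Decidable (Spec_extract_person text out) := by unfold Spec_extract_person; infer_instance

-- ===== CLAIM (what is proved, stated in full; the proofs are below) =====
def Claim_equal_extract_person : Prop := ∀ (text : String), Dom_extract_person text → Spec_extract_person text (extract_person text)

-- ===== LEMMAS AND PROOFS =====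

-- common shape of the marker search: scan carrying the previous word
def pvFmPrev : List String → Option String → Option String
  | [], _ => none
  | w :: rest, prev =>
    if (["ko", "ne", "se"] : List String).contains (PySem.Str.lower w) then
      match prev with
      | some p => some (normalize_name p)
      | none => pvFmPrev rest (some w)
    else pvFmPrev rest (some w)

theorem pvGetLast_of_append (pre : List String) (ys : List String) (h : pre ≠ []) :
    PySem.List.pyGet? (pre ++ ys) ((pre.length : Int) - 1) = pre.getLast? := by
  have hl : 1 ≤ pre.length := Nat.one_le_iff_ne_zero.mpr (by simpa using h)
  have hcast : ((pre.length : Int) - 1) = ((pre.length - 1 : Nat) : Int) := by omega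
  rw [hcast, PySem.List.pyGet?_natCast]
  rw [List.getElem?_append_left (by omega)]
  rw [List.getLast?_eq_getElem?]

theorem pvLoopA_eq (suf : List String) : ∀ (pre : List String),
    pvLoopA (pre ++ suf) (PySem.List.enumerate suf (pre.length : Int)) =
      pvFmPrev suf pre.getLast? := by
  induction suf with
  | nil => intro pre; simp [pvLoopA, pvFmPrev, PySem.List.enumerate_nil]
  | cons w rest ih =>
    intro pre
    rw [PySem.List.enumerate_cons]
    have ih' := ih (pre ++ [w])
    have hlen : (((pre ++ [w]).length : Nat) : Int) = (pre.length : Int) + 1 := by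
      simp
    rw [hlen] at ih'
    rw [List.append_assoc] at ih'
    simp only [List.getLast?_append, List.getLast?_singleton] at ih'
    by_cases hm : (["ko", "ne", "se"] : List String).contains (PySem.Str.lower w)
    · by_cases hpre : pre = []
      · subst hpre
        simp only [pvLoopA, hm, if_true]
        have : ¬ ((0 : Int) > 0) := by omega
        simp only [List.length_nil, Int.natCast_zero, this, if_false]
        simpa [pvFmPrev, hm] using ih'
      · simp only [pvLoopA, hm, if_true]
        have hpos : ((pre.length : Int) > 0) := by
          have : 1 ≤ pre.length := Nat.one_le_iff_ne_zero.mpr (by simpa using hpre)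
          omega
        simp only [hpos, if_true]
        rw [pvGetLast_of_append pre (w :: rest) hpre]
        simp only [pvFmPrev, hm, if_true]
        rcases hlast : pre.getLast? with _ | p
        · exact absurd (List.getLast?_eq_none_iff.mp hlast) hpre
        · simp
    · simp only [pvLoopA, hm]
      simp only [pvFmPrev, hm]
      simpa using ih'

theorem pvLoopB_eq (ws : List String) : ∀ (prev fb : Option String),
    pvLoopB ws prev fb =
      match pvFmPrev ws prev with
      | some r => r
      | none => (fb.or (pvLoopA2 ws)).getD "Unknown" := by
  induction ws with
  | nil =>
    intro prev fb
    cases fb <;> simp [pvLoopB, pvFmPrev, pvLoopA2]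
  | cons w rest ih =>
    intro prev fb
    have hupd : (pvUpd fb w).or (pvLoopA2 rest) = fb.or (pvLoopA2 (w :: rest)) := by
      cases fb with
      | some v => rfl
      | none =>
        simp only [pvUpd, pvLoopA2, Option.none_or]
        rcases h0 : PySem.List.pyGet? w.toList 0 with _ | c
        · rfl
        · simp only [Bool.and_eq_true, Bool.not_eq_eq_eq_not, Bool.not_true,
            PySem.Str.strIsdigit, PySem.Str.lower]
          split_ifs <;> rfl
    by_cases hm : (["ko", "ne", "se"] : List String).contains (PySem.Str.lower w) = true
    · cases prev with
      | some p =>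
        simp only [pvLoopB, pvFmPrev]
        rw [if_pos hm, if_pos hm]
      | none =>
        simp only [pvLoopB, pvFmPrev]
        rw [if_pos hm, ih (some w) (pvUpd fb w), hupd]
    · cases prev with
      | some p =>
        simp only [pvLoopB, pvFmPrev]
        rw [if_neg hm, if_neg hm, ih (some w) (pvUpd fb w), hupd]
      | none =>
        simp only [pvLoopB, pvFmPrev]
        rw [if_neg hm, ih (some w) (pvUpd fb w), hupd]

-- ===== VERDICT (by name: the statement is the Claim_ definition above) =====
theorem extract_person_spec : Claim_equal_extract_person := by
  intro text _
  unfold Spec_extract_person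
  simp only [extract_person, extract_person_alt]
  have hA := pvLoopA_eq (PySem.Str.split₀ text) []
  simp only [List.nil_append, List.length_nil, Int.natCast_zero, List.getLast?_nil] at hA
  rw [hA, pvLoopB_eq (PySem.Str.split₀ text) none none]
  cases hp : pvFmPrev (PySem.Str.split₀ text) none with
  | some r => rfl
  | none =>
    simp only [Option.none_or]
    cases h2 : pvLoopA2 (PySem.Str.split₀ text) <;> rfl
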